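-- pv_equiv track=rewrite | github.com/JunseoMin/RoadToDiamond | Python3/프로그래머스/2/12973. 짝지어 제거하기/짝지어 제거하기.py | solution
-- ===== SOURCE A (Python) =====
-- def solution(s):
--     stack = []
--
--     for c in s:
--         stack.append(c)
--         if len(stack) >= 2:
--             if stack[-1] == stack[-2]:
--                 stack.pop()
--                 stack.pop()
--
--     return 0 if len(stack) else 1
-- ===== SOURCE B (Python) =====
-- def solution(s):
--     t = list(s)
--     while True:
--         out = []
--         i = 0
--         while i < len(t):
--             if i + 1 < len(t) and t[i] == t[i + 1]:
--                 i += 2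
--             else:
--                 out.append(t[i])
--                 i += 1
--         if len(out) == len(t):
--             break
--         t = out
--     return 1 if not t else 0
-- ===== Notes on version B (the rewrite author's own statement) =====
-- stated objective: alternative
-- what changed: Replaces A's single stack pass with repeated full scans that each delete disjoint adjacent equal pairs until a fixpoint; correctness rests on confluence of adjacent-pair removal.
import Mathlib
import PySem

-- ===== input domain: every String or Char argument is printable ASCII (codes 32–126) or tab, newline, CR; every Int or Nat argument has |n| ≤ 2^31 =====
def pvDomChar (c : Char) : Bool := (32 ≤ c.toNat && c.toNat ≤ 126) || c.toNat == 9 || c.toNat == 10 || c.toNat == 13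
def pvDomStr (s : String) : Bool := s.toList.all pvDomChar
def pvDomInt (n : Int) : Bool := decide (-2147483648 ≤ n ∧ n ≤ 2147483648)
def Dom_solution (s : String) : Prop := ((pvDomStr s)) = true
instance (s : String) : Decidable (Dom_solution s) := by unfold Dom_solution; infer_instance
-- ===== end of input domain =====

-- B replaces A's single stack pass by repeated full scans that delete disjoint adjacent
-- equal pairs until a fixpoint (alternative algorithm; correctness = confluence of pair removal).

-- ===== PORT A =====
-- one iteration of A's for-loop body: append c, then pop twice if the last two match
def solutionStep (stack : List Char) (c : Char) : List Char :=
  let stack := stack ++ [c]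
  if 2 ≤ stack.length then
    if PySem.List.pyGet? stack (-1) = PySem.List.pyGet? stack (-2) then
      stack.dropLast.dropLast
    else stack
  else stack

def solution (s : String) : Int :=
  let stack := s.toList.foldl solutionStep []
  if stack.length ≠ 0 then 0 else 1

-- ===== PORT B =====
-- one inner-while scan of Source B: walk left to right, skip an adjacent equal pair, else keep the char
def scanB : List Char → List Char
  | [] => []
  | [a] => [a]
  | a :: b :: rest => if a = b then scanB rest else a :: scanB (b :: rest)

-- termination helper for loopB: a scan never lengthens the list
theorem scanB_length_le (t : List Char) : (scanB t).length ≤ t.length := by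
  induction t using scanB.induct with
  | case1 => simp [scanB]
  | case2 a => simp [scanB]
  | case3 b rest ih =>
    have e : scanB (b :: b :: rest) = scanB rest := by simp [scanB]
    rw [e]
    simp only [List.length_cons]
    omega
  | case4 a b rest h ih =>
    simp only [scanB, if_neg h, List.length_cons]
    simp only [List.length_cons] at ih
    omega

-- the outer while-loop of Source B: rescan until the length stops shrinking
def loopB (t : List Char) : List Char :=
  if (scanB t).length = t.length then t else loopB (scanB t)
termination_by t.length
decreasing_by
  rename_i h
  have := scanB_length_le t
  omega

def solution_alt (s : String) : Int :=
  let t := loopB s.toList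
  if t.isEmpty then 1 else 0

-- ===== PRECONDITION & SPEC =====
def Spec_solution (s : String) (out : Int) : Prop := out = solution_alt s
instance (s : String) (out : Int) : Decidable (Spec_solution s out) := by unfold Spec_solution; infer_instance

-- ===== CLAIM (what is proved, stated in full; the proofs are below) =====
def Claim_equal_solution : Prop := ∀ (s : String), Dom_solution s → Spec_solution s (solution s)

-- ===== LEMMAS AND PROOFS =====

-- A's stack with the top at the FRONT: push cancels against the head
def push (r : List Char) (a : Char) : List Char :=
  if r.head? = some a then r.tail else a :: r

-- a list with no two equal adjacent elements
def noAdj (l : List Char) : Prop := List.IsChain (· ≠ ·) l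

theorem stepA (st : List Char) (c : Char) :
    solutionStep st c = (push st.reverse c).reverse := by
  rcases List.eq_nil_or_concat st with h | ⟨l, x, h⟩
  · subst h; simp [solutionStep, push]
  · subst h
    have e : (l ++ [x]) ++ [c] = l ++ [x, c] := by simp
    have g1 : PySem.List.pyGet? (l ++ [x, c]) (-1) = some c := by
      rw [← e, PySem.List.pyGet?_neg_one_append_singleton]
    have g2 : PySem.List.pyGet? (l ++ [x, c]) (-2) = some x := by
      rw [PySem.List.pyGet?_neg_ofNat (l ++ [x, c]) 2 (by omega) (by simp)]
      simp
    by_cases hx : x = c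
    · subst hx
      simp [solutionStep, push, e, g1, g2]
    · simp [solutionStep, push, e, g1, g2, hx, Ne.symm hx]

theorem foldA (s : List Char) : ∀ (st : List Char),
    s.foldl solutionStep st = (s.foldl push st.reverse).reverse := by
  induction s with
  | nil => intro st; simp
  | cons c s ih =>
    intro st
    simp only [List.foldl_cons]
    rw [ih (solutionStep st c), stepA, List.reverse_reverse]

theorem push_noAdj {r : List Char} (a : Char) (h : noAdj r) : noAdj (push r a) := by
  unfold noAdj push at *
  cases r with
  | nil => simp
  | cons b t =>
    by_cases hb : b = a
    · simpa [hb] using h.tail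
    · rw [List.head?_cons, if_neg (by simpa using fun e => hb e)]
      exact (List.isChain_cons_cons).mpr ⟨Ne.symm hb, h⟩

theorem push_push {r : List Char} (a : Char) (h : noAdj r) :
    push (push r a) a = r := by
  cases r with
  | nil => simp [push]
  | cons b t =>
    by_cases hb : b = a
    · subst hb
      have h2 : push (b :: t) b = t := by simp [push]
      rw [h2]
      cases t with
      | nil => simp [push]
      | cons y u =>
        have hy : b ≠ y := List.rel_of_isChain_cons_cons h
        simp [push, Ne.symm hy]
    · have h1 : push (b :: t) a = a :: b :: t := by
        simp only [push, List.head?_cons]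
        rw [if_neg (by simpa using hb)]
      rw [h1]
      simp only [push, List.head?_cons, List.tail_cons]
      simp

theorem scanB_preserve (t : List Char) : ∀ r, noAdj r →
    (scanB t).foldl push r = t.foldl push r := by
  induction t using scanB.induct with
  | case1 => intro r _; simp [scanB]
  | case2 a => intro r _; simp [scanB]
  | case3 b rest ih =>
    intro r hr
    have e : scanB (b :: b :: rest) = scanB rest := by simp [scanB]
    rw [e, List.foldl_cons, List.foldl_cons, push_push b hr, ih r hr]
  | case4 a b rest h ih =>
    intro r hr
    simp only [scanB, if_neg h, List.foldl_cons]
    exact ih (push r a) (push_noAdj a hr)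

theorem scanB_fix (t : List Char) (h : (scanB t).length = t.length) :
    noAdj t ∧ scanB t = t := by
  induction t using scanB.induct with
  | case1 => exact ⟨List.isChain_nil, rfl⟩
  | case2 a => exact ⟨List.isChain_singleton a, rfl⟩
  | case3 b rest ih =>
    exfalso
    have := scanB_length_le rest
    have e : scanB (b :: b :: rest) = scanB rest := by simp [scanB]
    rw [e] at h
    simp only [List.length_cons] at h
    omega
  | case4 a b rest hne ih =>
    simp only [scanB, if_neg hne, List.length_cons] at h ⊢
    obtain ⟨h1, h2⟩ := ih (by simp only [List.length_cons]; omega)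
    exact ⟨List.isChain_cons_cons.mpr ⟨hne, h1⟩, by rw [h2]⟩

theorem loopB_spec (t : List Char) :
    noAdj (loopB t) ∧ (loopB t).foldl push [] = t.foldl push [] := by
  rw [loopB]
  split
  · rename_i h
    exact ⟨(scanB_fix t h).1, rfl⟩
  · obtain ⟨h1, h2⟩ := loopB_spec (scanB t)
    exact ⟨h1, by rw [h2, scanB_preserve t [] List.isChain_nil]⟩
termination_by t.length
decreasing_by
  rename_i h
  have := scanB_length_le t
  omega

theorem noAdj_reverse {l : List Char} (h : noAdj l) : noAdj l.reverse := by
  unfold noAdj at *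
  rw [List.isChain_reverse]
  exact h.imp (fun _ _ hab e => hab e.symm)

theorem nf_eq (x : List Char) : ∀ r, noAdj (x.reverse ++ r) →
    x.foldl push r = x.reverse ++ r := by
  induction x with
  | nil => intro r _; simp
  | cons a x ih =>
    intro r h
    have h' : noAdj (x.reverse ++ a :: r) := by simpa using h
    have hsuf : noAdj (a :: r) := h'.suffix ⟨x.reverse, rfl⟩
    have hpush : push r a = a :: r := by
      cases r with
      | nil => simp [push]
      | cons b u =>
        have : a ≠ b := List.rel_of_isChain_cons_cons hsuf
        simp only [push, List.head?_cons]
        rw [if_neg (by simpa using Ne.symm this)]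
    simp only [List.foldl_cons, hpush, List.reverse_cons, List.append_assoc,
      List.singleton_append]
    exact ih (a :: r) h'

-- ===== VERDICT (by name: the statement is the Claim_ definition above) =====
theorem solution_spec : Claim_equal_solution := by
  intro s _
  unfold Spec_solution solution solution_alt
  obtain ⟨h1, h2⟩ := loopB_spec s.toList
  have hA : s.toList.foldl solutionStep [] = loopB s.toList := by
    rw [foldA s.toList []]
    simp only [List.reverse_nil]
    rw [← h2, nf_eq (loopB s.toList) [] (by simpa using noAdj_reverse h1)]
    simp
  rw [hA]
  cases h : loopB s.toList with
  | nil => simp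
  | cons a t => simp
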